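-- pv_equiv track=rewrite | github.com/mnavaid925/NavMSM | apps/pps/services/optimizer.py | _changeover_count
-- ===== SOURCE A (Python) =====
-- def _changeover_count(orders):
--     last_product = None
--     n = 0
--     for o in orders:
--         if last_product is not None and o['product_id'] != last_product:
--             n += 1
--         last_product = o['product_id']
--     return n
-- ===== SOURCE B (Python) =====
-- def _changeover_count(orders):
--     ids = [o['product_id'] for o in orders]
--
--     def count(lo, hi):
--         # changeovers strictly inside ids[lo:hi], by divide and conquer
--         if hi - lo < 2:
--             return 0
--         mid = (lo + hi) // 2
--         return count(lo, mid) + count(mid, hi) + (1 if ids[mid - 1] != ids[mid] else 0)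
--
--     return count(0, len(ids))
-- ===== Notes on version B (the rewrite author's own statement) =====
-- stated objective: alternative
-- what changed: Replaces A's single left-to-right pass with a running last_product by a divide-and-conquer recursion over index intervals: changeovers in [lo,hi) = changeovers in each half plus the boundary comparison ids[mid-1] != ids[mid].
import Mathlib
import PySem

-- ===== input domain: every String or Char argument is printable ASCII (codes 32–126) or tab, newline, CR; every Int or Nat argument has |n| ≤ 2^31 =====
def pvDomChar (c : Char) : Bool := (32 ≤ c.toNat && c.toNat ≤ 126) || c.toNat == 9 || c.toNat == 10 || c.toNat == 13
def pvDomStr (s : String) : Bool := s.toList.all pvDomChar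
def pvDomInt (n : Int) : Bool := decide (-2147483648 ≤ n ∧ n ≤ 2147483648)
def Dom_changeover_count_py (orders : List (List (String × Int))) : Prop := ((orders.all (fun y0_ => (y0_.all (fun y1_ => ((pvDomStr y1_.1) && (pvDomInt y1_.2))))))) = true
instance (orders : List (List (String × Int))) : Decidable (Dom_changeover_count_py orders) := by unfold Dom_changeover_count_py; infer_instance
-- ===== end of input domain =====

-- B replaces A's single left-to-right pass with a running last_product by a divide-and-conquer
-- recursion over index intervals (changes in [lo,hi) = changes in each half + boundary pair).

-- ===== PORT A =====
-- o['product_id']: first match in the association list (default 0 is unreachable under Pre_)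
def pvPid (o : List (String × Int)) : Int :=
  ((o.find? (fun p => p.1 == "product_id")).map Prod.snd).getD 0

-- A's loop: state (last_product, n), one step per order
def pvLoopA : List (List (String × Int)) → Option Int → Int → Int
  | [], _, n => n
  | o :: t, last, n =>
    let p := pvPid o
    let n' := match last with
      | none => n
      | some l => if p ≠ l then n + 1 else n
    pvLoopA t (some p) n'

def changeover_count_py (orders : List (List (String × Int))) : Int :=
  pvLoopA orders none 0

-- ===== PORT B =====
-- B's inner count(lo, hi); ids[mid-1] and ids[mid] are always in range when reached
-- (lo ≤ mid-1 < mid < hi ≤ len), so getD 0 is exact for the indexing B performs.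
def pvCC (ids : List Int) (lo hi : Nat) : Int :=
  if _h : hi - lo < 2 then 0
  else
    let mid := (lo + hi) / 2
    pvCC ids lo mid + pvCC ids mid hi +
      (if ids.getD (mid - 1) 0 ≠ ids.getD mid 0 then 1 else 0)
termination_by hi - lo
decreasing_by all_goals omega

def changeover_count_py_alt (orders : List (List (String × Int))) : Int :=
  pvCC (orders.map pvPid) 0 (orders.map pvPid).length

-- ===== PRECONDITION & SPEC =====
-- Pre_ excludes orders whose dict lacks the key 'product_id', on which A (and B) raise KeyError.
def Pre_changeover_count_py (orders : List (List (String × Int))) : Prop :=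
  (orders.all (fun o => o.any (fun p => p.1 == "product_id"))) = true
instance (orders : List (List (String × Int))) : Decidable (Pre_changeover_count_py orders) := by unfold Pre_changeover_count_py; infer_instance

def pvWitness_changeover_count_py : (List (List (String × Int))) :=
  [[("product_id", 1)], [("product_id", 2)], [("product_id", 2)]]

def Spec_changeover_count_py (orders : List (List (String × Int))) (out : Int) : Prop := out = changeover_count_py_alt orders
instance (orders : List (List (String × Int))) (out : Int) : Decidable (Spec_changeover_count_py orders out) := by unfold Spec_changeover_count_py; infer_instance

-- ===== CLAIM (what is proved, stated in full; the proofs are below) =====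
def Claim_equal_changeover_count_py : Prop := ∀ (orders : List (List (String × Int))), Dom_changeover_count_py orders → Pre_changeover_count_py orders → Spec_changeover_count_py orders (changeover_count_py orders)

-- ===== LEMMAS AND PROOFS =====

-- number of adjacent unequal pairs (proof-only characterisation both ports are reduced to)
def pvAdj : List Int → Int
  | [] => 0
  | [_] => 0
  | x :: y :: t => (if x ≠ y then 1 else 0) + pvAdj (y :: t)

-- indicator that positions i and i+1 of ids differ
def pvE (ids : List Int) (i : Nat) : Int :=
  if ids.getD i 0 ≠ ids.getD (i + 1) 0 then 1 else 0

theorem pvLoopA_some (t : List (List (String × Int))) : ∀ (l n : Int),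
    pvLoopA t (some l) n = n + pvAdj (l :: t.map pvPid) := by
  induction t with
  | nil => intro l n; simp [pvLoopA, pvAdj]
  | cons o r ih =>
    intro l n
    simp only [pvLoopA, List.map_cons, ih, pvAdj]
    by_cases h : pvPid o = l
    · simp [h]
    · simp [h]; omega

theorem pvAdj_sum (ids : List Int) :
    pvAdj ids = ∑ i ∈ Finset.range (ids.length - 1), pvE ids i := by
  induction ids with
  | nil => simp [pvAdj]
  | cons x t ih =>
    cases t with
    | nil => simp [pvAdj]
    | cons y r =>
      have hsh : ∀ i : Nat, pvE (x :: y :: r) (i + 1) = pvE (y :: r) i := by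
        intro i; simp [pvE, List.getD]
      have hlen : (x :: y :: r).length - 1 = ((y :: r).length - 1) + 1 := by
        simp
      rw [pvAdj, ih, hlen, Finset.sum_range_succ']
      simp only [hsh]
      have h0 : pvE (x :: y :: r) 0 = if x ≠ y then 1 else 0 := by
        simp [pvE, List.getD]
      rw [h0]; ring

theorem pvCC_sum (ids : List Int) (lo hi : Nat) :
    pvCC ids lo hi = ∑ i ∈ Finset.Ico lo (hi - 1), pvE ids i := by
  fun_induction pvCC ids lo hi with
  | case1 lo hi h =>
    have : Finset.Ico lo (hi - 1) = ∅ := by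
      apply Finset.Ico_eq_empty; omega
    simp [this]
  | case2 lo hi h mid ih1 ih2 =>
    have hm : mid = (lo + hi) / 2 := rfl
    have hmid : lo + 1 ≤ mid ∧ mid + 1 ≤ hi := by omega
    rw [ih1, ih2]
    have hb : pvE ids (mid - 1) = if ids.getD (mid - 1) 0 ≠ ids.getD mid 0 then 1 else 0 := by
      have : mid - 1 + 1 = mid := by omega
      rw [pvE, this]
    rw [← hb]
    have h1 : mid - 1 + 1 = mid := by omega
    have h2 : (∑ i ∈ Finset.Ico lo (mid - 1), pvE ids i) + pvE ids (mid - 1)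
        = ∑ i ∈ Finset.Ico lo mid, pvE ids i := by
      rw [← h1, Finset.sum_Ico_succ_top (by omega)]; simp
    have h3 : (∑ i ∈ Finset.Ico lo mid, pvE ids i) + ∑ i ∈ Finset.Ico mid (hi - 1), pvE ids i
        = ∑ i ∈ Finset.Ico lo (hi - 1), pvE ids i := by
      rw [Finset.sum_Ico_consecutive _ (by omega) (by omega)]
    omega

theorem changeover_count_py_spec : Claim_equal_changeover_count_py := by
  intro orders _ _
  unfold Spec_changeover_count_py changeover_count_py changeover_count_py_alt
  rw [pvCC_sum, ← Finset.range_eq_Ico, ← pvAdj_sum]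
  cases orders with
  | nil => simp [pvLoopA, pvAdj]
  | cons o t => simp only [pvLoopA, pvLoopA_some, List.map_cons]; omega
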